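-- pv_equiv track=rewrite | github.com/tqec/TopoLS | src/TopoLS/layer_mcts.py | lifting_path
-- ===== SOURCE A (Python) =====
-- def lifting_path(path):
--     """
--     Lifts a path upward by one unit after the first detected horizontal turn.
--
--     This is used to avoid collisions or conflicts at corner points by elevating
--     the remaining segment of the path.
--     """
--
--     for i in range(1, len(path) - 1):
--         prev = path[i - 1]
--         curr = path[i]
--         nxt = path[i + 1]
--
--         # Detect change of direction in the x-y plane
--         dx1, dy1 = curr[0] - prev[0], curr[1] - prev[1]
--         dx2, dy2 = nxt[0] - curr[0], nxt[1] - curr[1]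
--
--         if (dx1, dy1) != (dx2, dy2):
--             # First corner detected at `curr`
--             lifted_path = []
--
--             # Keep the original path up to the corner
--             lifted_path.extend(path[:i+1])
--
--             # Insert a vertical lift at the corner
--             lifted_path.append((curr[0], curr[1], curr[2] + 1))
--
--             # Elevate the remaining path segment
--             for j in range(i + 1, len(path)):
--                 x, y, z = path[j]
--                 lifted_path.append((x, y, z + 1))
--
--             return lifted_path
-- ===== SOURCE B (Python) =====
-- def lifting_path(path):
--     # Structural recursion: while the first three points are xy-collinear,
--     # peel off the head and prepend it to the recursive answer; at the first
--     # turn (or a too-short path) the answer is built directly.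
--     if len(path) < 3:
--         return None
--     a, b, c = path[0], path[1], path[2]
--     if (b[0] - a[0], b[1] - a[1]) != (c[0] - b[0], c[1] - b[1]):
--         return [a, b, (b[0], b[1], b[2] + 1)] + [(p[0], p[1], p[2] + 1) for p in path[2:]]
--     rest = lifting_path(path[1:])
--     return None if rest is None else [a] + rest
-- ===== Notes on version B (the rewrite author's own statement) =====
-- stated objective: alternative
-- what changed: B replaces A's index loop (recomputing both deltas per index and appending item by item to an accumulator) by a structural recursion on the list: it peels off the head while the first three points are xy-collinear and prepends it to the recursive result, building the lifted tail directly at the first turn.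
import Mathlib
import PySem

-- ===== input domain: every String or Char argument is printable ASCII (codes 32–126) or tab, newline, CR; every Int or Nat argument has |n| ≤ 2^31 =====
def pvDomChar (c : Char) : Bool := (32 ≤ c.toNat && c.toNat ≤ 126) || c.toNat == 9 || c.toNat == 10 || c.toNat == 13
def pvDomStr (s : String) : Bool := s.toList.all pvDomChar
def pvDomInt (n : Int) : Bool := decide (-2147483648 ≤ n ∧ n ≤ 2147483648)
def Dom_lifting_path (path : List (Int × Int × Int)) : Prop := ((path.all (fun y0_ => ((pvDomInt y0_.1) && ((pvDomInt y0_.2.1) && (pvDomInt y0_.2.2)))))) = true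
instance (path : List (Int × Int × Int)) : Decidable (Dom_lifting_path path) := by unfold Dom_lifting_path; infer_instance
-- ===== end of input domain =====

-- B is a structural recursion on the list (peel the head while the first three points are
-- xy-collinear) instead of A's index loop with per-step appends; objective: alternative.


-- ===== PORT A =====
-- inner loop: for j in range(i+1, len(path)): lifted_path.append((x, y, z+1))
def liftA_tail (path : List (Int × Int × Int)) (j : Nat) (acc : List (Int × Int × Int)) :
    List (Int × Int × Int) :=
  if _h : j < path.length then
    let p := path.getD j (0, 0, 0)
    liftA_tail path (j + 1) (acc ++ [(p.1, p.2.1, p.2.2 + 1)])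
  else acc
termination_by path.length - j

-- outer loop: for i in range(1, len(path) - 1), with the early return
def liftA_find (path : List (Int × Int × Int)) (i : Nat) : Option (List (Int × Int × Int)) :=
  if h : i + 1 < path.length then
    let prev := path.getD (i - 1) (0, 0, 0)
    let curr := path.getD i (0, 0, 0)
    let nxt := path.getD (i + 1) (0, 0, 0)
    if (curr.1 - prev.1, curr.2.1 - prev.2.1) ≠ (nxt.1 - curr.1, nxt.2.1 - curr.2.1) then
      some (liftA_tail path (i + 1) (path.take (i + 1) ++ [(curr.1, curr.2.1, curr.2.2 + 1)]))
    else liftA_find path (i + 1)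
  else none
termination_by path.length - i

def lifting_path (path : List (Int × Int × Int)) : Option (List (Int × Int × Int)) :=
  liftA_find path 1

-- ===== PORT B =====
-- structural recursion of Source B: head/tail pattern match instead of indices
def lifting_path_alt : List (Int × Int × Int) → Option (List (Int × Int × Int))
  | a :: b :: c :: rest =>
    if (b.1 - a.1, b.2.1 - a.2.1) ≠ (c.1 - b.1, c.2.1 - b.2.1) then
      some ([a, b, (b.1, b.2.1, b.2.2 + 1)] ++
        (c :: rest).map (fun p => (p.1, p.2.1, p.2.2 + 1)))
    else
      match lifting_path_alt (b :: c :: rest) with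
      | none => none
      | some r => some (a :: r)
  | _ => none

-- ===== PRECONDITION & SPEC =====
def Spec_lifting_path (path : List (Int × Int × Int)) (out : Option (List (Int × Int × Int))) : Prop := out = lifting_path_alt path
instance (path : List (Int × Int × Int)) (out : Option (List (Int × Int × Int))) : Decidable (Spec_lifting_path path out) := by unfold Spec_lifting_path; infer_instance

-- ===== CLAIM (what is proved, stated in full; the proofs are below) =====
def Claim_equal_lifting_path : Prop := ∀ (path : List (Int × Int × Int)), Dom_lifting_path path → Spec_lifting_path path (lifting_path path)

-- ===== LEMMAS AND PROOFS =====

theorem liftA_tail_eq (path : List (Int × Int × Int)) :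
    ∀ (n j : Nat) (acc : List (Int × Int × Int)), path.length - j = n →
      liftA_tail path j acc = acc ++ (path.drop j).map (fun p => (p.1, p.2.1, p.2.2 + 1)) := by
  intro n
  induction n with
  | zero =>
    intro j acc hn
    rw [liftA_tail, dif_neg (by omega)]
    rw [List.drop_eq_nil_of_le (by omega)]
    simp
  | succ n ih =>
    intro j acc hn
    have h : j < path.length := by omega
    rw [liftA_tail, dif_pos h]
    rw [ih (j + 1) _ (by omega)]
    rw [List.drop_eq_getElem_cons h]
    simp only [List.getD, List.getElem?_eq_getElem h, Option.getD_some, List.map_cons,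
      List.append_assoc, List.cons_append, List.nil_append]

-- shifting A's scan past a peeled head
theorem liftA_find_shift (a : Int × Int × Int) (t : List (Int × Int × Int)) :
    ∀ (n i : Nat), t.length - i = n → 1 ≤ i →
      liftA_find (a :: t) (i + 1) = Option.map (a :: ·) (liftA_find t i) := by
  intro n
  induction n with
  | zero =>
    intro i hn hi
    rw [liftA_find, dif_neg (by simp; omega), liftA_find, dif_neg (by omega)]
    rfl
  | succ n ih =>
    intro i hn hi
    by_cases h : i + 1 < t.length
    · have h' : i + 1 + 1 < (a :: t).length := by simp; omega
      conv_lhs => rw [liftA_find]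
      conv_rhs => rw [liftA_find]
      rw [dif_pos h', dif_pos h]
      have e1 : i + 1 - 1 = (i - 1) + 1 := by omega
      rw [e1]
      simp only [List.getD_cons_succ]
      split_ifs with hc
      · rw [liftA_tail_eq (a :: t) ((a :: t).length - (i + 1 + 1)) (i + 1 + 1) _ rfl,
          liftA_tail_eq t (t.length - (i + 1)) (i + 1) _ rfl]
        simp [List.take_succ_cons]
      · exact ih (i + 1) (by omega) (by omega)
    · rw [liftA_find, dif_neg (by simp; omega), liftA_find, dif_neg h]
      rfl

-- ===== VERDICT (by name: the statement is the Claim_ definition above) =====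
theorem lifting_path_spec : Claim_equal_lifting_path := by
  intro path hD
  clear hD
  unfold Spec_lifting_path
  induction path with
  | nil => simp [lifting_path, liftA_find, lifting_path_alt]
  | cons a t ih =>
    match t, ih with
    | [], _ => simp [lifting_path, liftA_find, lifting_path_alt]
    | [b], _ => simp [lifting_path, liftA_find, lifting_path_alt]
    | b :: c :: rest, ih =>
      show liftA_find (a :: b :: c :: rest) 1 = _
      conv_lhs => rw [liftA_find]
      rw [dif_pos (by simp), lifting_path_alt]
      simp only [List.getD, List.getElem?_cons_zero, List.getElem?_cons_succ, Option.getD_some,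
        show (1:Nat) - 1 = 0 from rfl, show (1:Nat) + 1 = 0 + 1 + 1 from rfl]
      split_ifs with hc
      · rw [liftA_tail_eq (a :: b :: c :: rest) ((a :: b :: c :: rest).length - (0 + 1 + 1))
          (0 + 1 + 1) _ rfl]
        simp
      · rw [show (0:Nat) + 1 + 1 = 1 + 1 from rfl,
          liftA_find_shift a (b :: c :: rest) ((b :: c :: rest).length - 1) 1 rfl le_rfl,
          show liftA_find (b :: c :: rest) 1 = lifting_path_alt (b :: c :: rest) from ih]
        cases lifting_path_alt (b :: c :: rest) <;> rfl
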